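-- pv_equiv track=rewrite | github.com/PennLINC/sypres-docs | scripts/format_pubs.py | remove_alternate_commas
-- ===== SOURCE A (Python) =====
-- def remove_alternate_commas(input_string):
--     output_string = ""
--     comma_count = 1
--
--     for char in input_string:
--         if char == ",":
--             comma_count += 1
--             if comma_count % 2 != 0:
--                 output_string += char
--         else:
--             output_string += char
--
--     return output_string
-- ===== SOURCE B (Python) =====
-- def remove_alternate_commas(input_string):
--     parts = input_string.split(',')
--     pieces = [parts[0]]
--     for i, part in enumerate(parts[1:], 1):
--         pieces.append(',' + part if i % 2 == 0 else part)
--     return ''.join(pieces)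
-- ===== Notes on version B (the rewrite author's own statement) =====
-- stated objective: simpler
-- what changed: B splits the string on commas once and reassembles the segments with a single join, re-inserting only the comma before each even-indexed segment, instead of A's per-character scan that counts commas and appends to a string with += on every character.
import Mathlib
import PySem

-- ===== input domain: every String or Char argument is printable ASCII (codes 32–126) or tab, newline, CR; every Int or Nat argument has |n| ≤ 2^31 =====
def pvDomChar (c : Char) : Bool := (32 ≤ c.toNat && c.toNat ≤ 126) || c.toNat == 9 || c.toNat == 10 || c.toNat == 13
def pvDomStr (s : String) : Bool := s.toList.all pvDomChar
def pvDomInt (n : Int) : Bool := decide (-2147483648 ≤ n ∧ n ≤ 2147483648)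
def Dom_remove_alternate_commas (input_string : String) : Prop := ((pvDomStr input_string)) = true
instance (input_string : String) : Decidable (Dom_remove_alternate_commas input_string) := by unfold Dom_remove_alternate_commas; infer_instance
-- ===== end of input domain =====

-- B rebuilds the output from the comma-split segments (keep the comma before every even-indexed segment) instead of A's per-character scan with a running comma counter; objective: simpler.

-- ===== PORT A =====
-- A: for char in input_string: bump comma_count on commas, keep the comma when the count is odd, keep other chars.
def remove_alternate_commas (input_string : String) : String :=
  String.ofList
    (input_string.toList.foldl
      (fun (st : List Char × Int) ch =>
        if ch = ',' then
          if PySem.Int.mod (st.2 + 1) 2 ≠ 0 then (st.1 ++ [ch], st.2 + 1) else (st.1, st.2 + 1)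
        else (st.1 ++ [ch], st.2))
      ([], 1)).1

-- ===== PORT B =====
-- B: parts = split(','); pieces = [parts[0]] then append ','+part when the 1-based segment index is even; ''.join.
def remove_alternate_commas_alt (input_string : String) : String :=
  String.ofList
    (PySem.Chars.join []
      ((PySem.List.enumerate (PySem.List.slice (PySem.Chars.splitOn input_string.toList [',']) (some 1) none) 1).foldl
        (fun (acc : List (List Char)) p =>
          acc ++ [if PySem.Int.mod p.1 2 = 0 then ',' :: p.2 else p.2])
        [PySem.List.pyGetD (PySem.Chars.splitOn input_string.toList [',']) 0 []]))

-- ===== PRECONDITION & SPEC =====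
def Spec_remove_alternate_commas (input_string : String) (out : String) : Prop := out = remove_alternate_commas_alt input_string
instance (input_string : String) (out : String) : Decidable (Spec_remove_alternate_commas input_string out) := by unfold Spec_remove_alternate_commas; infer_instance

-- ===== CLAIM (what is proved, stated in full; the proofs are below) =====
def Claim_equal_remove_alternate_commas : Prop := ∀ (input_string : String), Dom_remove_alternate_commas input_string → Spec_remove_alternate_commas input_string (remove_alternate_commas input_string)

-- ===== LEMMAS AND PROOFS =====

-- canonical reference: b = whether the next comma is kept
def pvCanon : List Char → Bool → List Char
  | [], _ => []
  | c :: r, b =>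
    if c = ',' then (if b then ',' :: pvCanon r (!b) else pvCanon r (!b))
    else c :: pvCanon r b

-- structural form of split-on-comma
def pvSplit : List Char → List (List Char)
  | [] => [[]]
  | c :: r => if c = ',' then [] :: pvSplit r else (pvSplit r).modifyHead (c :: ·)

-- reassembly of the tail segments: b = whether a kept comma precedes the next segment
def pvAsm : List (List Char) → Bool → List Char
  | [], _ => []
  | p :: ps, b => (if b then ',' :: p else p) ++ pvAsm ps (!b)

theorem pvSplit_ne_nil (l : List Char) : pvSplit l ≠ [] := by
  cases l with
  | nil => simp [pvSplit]
  | cons c r =>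
    simp only [pvSplit]
    split_ifs
    · simp
    · exact fun h => by
        have := List.modifyHead_eq_nil_iff (f := (c :: ·)) (l := pvSplit r)
        rw [h] at this; exact pvSplit_ne_nil r (this.mp rfl)

theorem pvSplitOn_go (l : List Char) : ∀ (fuel : Nat) (cur : List Char) (acc : List (List Char)),
    l.length + 1 ≤ fuel →
    PySem.Chars.splitOn.go [','] fuel l cur acc
      = acc.reverse ++ (pvSplit l).modifyHead (cur.reverse ++ ·) := by
  induction l with
  | nil =>
    intro fuel cur acc h
    match fuel with
    | f + 1 => simp [PySem.Chars.splitOn.go, pvSplit]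
  | cons c r ih =>
    intro fuel cur acc h
    match fuel with
    | f + 1 =>
      by_cases hc : c = ','
      · subst hc
        have hp : List.isPrefixOf [','] (',' :: r) = true := by simp [List.isPrefixOf]
        simp only [PySem.Chars.splitOn.go, hp, if_pos, List.length_cons, List.drop_succ_cons,
          List.length_nil, List.drop_zero]
        rw [ih f [] (List.reverse cur :: acc) (by simpa using Nat.le_of_succ_le_succ h)]
        simp only [pvSplit, if_true]
        cases pvSplit r <;> simp [List.modifyHead]
      · have hp : List.isPrefixOf [','] (c :: r) = false := by
          simp [List.isPrefixOf]; exact fun h' => (hc h'.symm).elim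
        simp only [PySem.Chars.splitOn.go, hp]
        rw [ih f (c :: cur) acc (by simpa using Nat.le_of_succ_le_succ h)]
        simp only [pvSplit, if_neg hc]
        obtain ⟨p, ps, hps⟩ := List.exists_cons_of_ne_nil (pvSplit_ne_nil r)
        rw [hps]
        simp

theorem pvSplitOn_eq (l : List Char) : PySem.Chars.splitOn l [','] = pvSplit l := by
  have := pvSplitOn_go l (l.length + 1) [] [] (le_refl _)
  rw [PySem.Chars.splitOn, this]
  obtain ⟨p, ps, hps⟩ := List.exists_cons_of_ne_nil (pvSplit_ne_nil l)
  rw [hps]; simp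

-- parity flip of the counters
theorem pvParity (k : Int) :
    decide (PySem.Int.mod (k + 1) 2 = 0) = !decide (PySem.Int.mod k 2 = 0) := by
  rw [PySem.Int.mod_eq_emod_of_pos (by norm_num), PySem.Int.mod_eq_emod_of_pos (by norm_num)]
  rcases Int.emod_two_eq k with h | h <;> simp [h] <;> omega

-- A's loop invariant
theorem pvA_fold (l : List Char) : ∀ (out : List Char) (cnt : Int),
    (l.foldl (fun (st : List Char × Int) ch =>
      if ch = ',' then
        if PySem.Int.mod (st.2 + 1) 2 ≠ 0 then (st.1 ++ [ch], st.2 + 1) else (st.1, st.2 + 1)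
      else (st.1 ++ [ch], st.2)) (out, cnt)).1
    = out ++ pvCanon l (decide (PySem.Int.mod cnt 2 = 0)) := by
  induction l with
  | nil => intro out cnt; simp [pvCanon]
  | cons c r ih =>
    intro out cnt
    rw [List.foldl_cons]
    by_cases hc : c = ','
    · subst hc
      rw [if_pos rfl]
      by_cases hk : PySem.Int.mod (cnt + 1) 2 ≠ 0
      · have hcnt : PySem.Int.mod cnt 2 = 0 := by
          rw [PySem.Int.mod_eq_emod_of_pos (by norm_num)] at hk ⊢
          omega
        rw [if_pos hk, ih, pvParity, pvCanon, if_pos rfl, decide_eq_true hcnt]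
        simp
      · have hk' := of_not_not hk
        have hcnt : PySem.Int.mod cnt 2 ≠ 0 := by
          rw [PySem.Int.mod_eq_emod_of_pos (by norm_num)] at hk' ⊢
          omega
        rw [if_neg hk, ih, pvParity, pvCanon, if_pos rfl, decide_eq_false hcnt]
        simp
    · rw [if_neg hc, ih]
      simp [pvCanon, hc]

-- canonical output as head-segment plus reassembled tail
theorem pvCanon_eq_asm (l : List Char) : ∀ (b : Bool),
    pvCanon l b = (pvSplit l).headI ++ pvAsm (pvSplit l).tail b := by
  induction l with
  | nil => intro b; simp [pvCanon, pvSplit, pvAsm]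
  | cons c r ih =>
    intro b
    by_cases hc : c = ','
    · subst hc
      simp only [pvCanon, pvSplit, List.headI, List.tail]
      obtain ⟨p, ps, hps⟩ := List.exists_cons_of_ne_nil (pvSplit_ne_nil r)
      rw [ih (!b), hps]
      cases b <;> simp [pvAsm]
    · simp only [pvCanon, pvSplit, if_neg hc]
      obtain ⟨p, ps, hps⟩ := List.exists_cons_of_ne_nil (pvSplit_ne_nil r)
      rw [ih b, hps]
      simp

-- ''.join is concatenation
theorem pvJoin_nil (ps : List (List Char)) : PySem.Chars.join [] ps = ps.flatten := by
  induction ps with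
  | nil => simp [PySem.Chars.join, List.intercalate]
  | cons p ps ih =>
    cases ps with
    | nil => simp [PySem.Chars.join, List.intercalate]
    | cons q qs =>
      simp only [PySem.Chars.join, List.intercalate, List.intersperse, List.flatten_cons] at *
      simpa using ih

-- B's enumerate loop flattens to pvAsm
theorem pvB_loop (ps : List (List Char)) : ∀ (k : Int),
    ((PySem.List.enumerate ps k).map
      (fun p => if PySem.Int.mod p.1 2 = 0 then ',' :: p.2 else p.2)).flatten
    = pvAsm ps (decide (PySem.Int.mod k 2 = 0)) := by
  induction ps with
  | nil => intro k; simp [PySem.List.enumerate_nil, pvAsm]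
  | cons p ps ih =>
    intro k
    rw [PySem.List.enumerate_cons]
    simp only [List.map_cons, List.flatten_cons, ih (k + 1), pvParity]
    by_cases hk : PySem.Int.mod k 2 = 0 <;> simp [pvAsm]

-- ===== VERDICT (by name: the statement is the Claim_ definition above) =====
theorem remove_alternate_commas_spec : Claim_equal_remove_alternate_commas := by
  intro s _
  show remove_alternate_commas s = remove_alternate_commas_alt s
  rw [remove_alternate_commas, remove_alternate_commas_alt]
  rw [pvA_fold, pvSplitOn_eq, PySem.List.foldl_append_singleton_eq_map,
      pvJoin_nil, PySem.List.slice_from_one]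
  rw [List.flatten_append, pvB_loop, pvCanon_eq_asm]
  obtain ⟨p, ps, hps⟩ := List.exists_cons_of_ne_nil (pvSplit_ne_nil s.toList)
  rw [hps]
  simp [PySem.List.pyGetD_zero_cons]
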